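-- pv_equiv track=rewrite | github.com/AhmadBadruAlHusaeni/webSismul | audio_utils.py | get_range_info
-- ===== SOURCE A (Python) =====
-- def get_range_info(diff):
--     ranges = [(7, 2), (15, 3), (31, 4), (63, 5), (127, 6), (255, 7), (511, 8), (1023, 9)]
--     for upper, bits_to_embed in ranges:
--         if diff <= upper:
--             lower = 0
--             if ranges.index((upper, bits_to_embed)) > 0:
--                 lower = ranges[ranges.index((upper, bits_to_embed)) - 1][0] + 1
--             return lower, upper, bits_to_embed
--     return 0, 2047, 11
-- ===== SOURCE B (Python) =====
-- def get_range_info(diff):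
--     uppers = [7, 15, 31, 63, 127, 255, 511, 1023]
--     ranges = [(7, 2), (15, 3), (31, 4), (63, 5), (127, 6), (255, 7), (511, 8), (1023, 9)]
--     # binary search for the first upper >= diff (bisect_left)
--     lo, hi = 0, len(uppers)
--     while lo < hi:
--         mid = (lo + hi) // 2
--         if uppers[mid] < diff:
--             lo = mid + 1
--         else:
--             hi = mid
--     if lo == len(uppers):
--         return 0, 2047, 11
--     upper, bits = ranges[lo]
--     lower = uppers[lo - 1] + 1 if lo > 0 else 0
--     return lower, upper, bits
-- ===== Notes on version B (the rewrite author's own statement) =====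
-- stated objective: alternative
-- what changed: Replaced the linear scan with repeated list.index lookups by a binary search (bisect_left) over a precomputed sorted threshold table, indexing directly into the (upper,bits) table.
import Mathlib
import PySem

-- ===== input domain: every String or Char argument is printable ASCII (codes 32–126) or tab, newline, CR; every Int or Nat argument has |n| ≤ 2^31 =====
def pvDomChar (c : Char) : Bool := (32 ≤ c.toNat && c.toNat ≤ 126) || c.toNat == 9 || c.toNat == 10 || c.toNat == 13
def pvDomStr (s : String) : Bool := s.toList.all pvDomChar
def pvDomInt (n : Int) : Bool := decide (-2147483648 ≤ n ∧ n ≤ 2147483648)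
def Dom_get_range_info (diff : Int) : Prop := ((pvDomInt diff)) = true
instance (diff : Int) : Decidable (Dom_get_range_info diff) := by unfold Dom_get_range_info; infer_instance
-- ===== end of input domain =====

-- B replaces A's linear scan with list.index lookups by a binary search over the sorted threshold table (alternative decomposition; return value only).

-- ===== PORT A =====
def pvRangesA : List (Int × Int) :=
  [(7, 2), (15, 3), (31, 4), (63, 5), (127, 6), (255, 7), (511, 8), (1023, 9)]

/-- the `for upper, bits_to_embed in ranges:` loop of A, scanning the list; the
    `ranges.index` / `ranges[…-1]` lookups go back to the full list `pvRangesA`. -/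
def pvLoopA (diff : Int) : List (Int × Int) → Int × Int × Int
  | [] => (0, 2047, 11)
  | (upper, bits) :: rest =>
    if diff ≤ upper then
      let lower : Int :=
        match PySem.List.index? pvRangesA (upper, bits) with
        | some i =>
          if i > 0 then
            match PySem.List.pyGet? pvRangesA ((i : Int) - 1) with
            | some p => p.1 + 1
            | none => 0         -- unreachable: index i-1 is in range
          else 0
        | none => 0             -- unreachable: the pair comes from pvRangesA
      (lower, upper, bits)
    else pvLoopA diff rest

def get_range_info (diff : Int) : Int × Int × Int := pvLoopA diff pvRangesA

-- ===== PORT B =====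
def pvUppersB : List Int := [7, 15, 31, 63, 127, 255, 511, 1023]
def pvRangesB : List (Int × Int) :=
  [(7, 2), (15, 3), (31, 4), (63, 5), (127, 6), (255, 7), (511, 8), (1023, 9)]

/-- the `while lo < hi` bisect_left loop of B (uppers[mid] is always in range). -/
def pvBisect (diff : Int) (lo hi : Nat) : Nat :=
  if _h : lo < hi then
    let mid := (lo + hi) / 2
    if pvUppersB.getD mid 0 < diff then pvBisect diff (mid + 1) hi
    else pvBisect diff lo mid
  else lo
termination_by hi - lo
decreasing_by all_goals omega

def get_range_info_alt (diff : Int) : Int × Int × Int :=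
  let lo := pvBisect diff 0 pvUppersB.length
  if lo = pvUppersB.length then (0, 2047, 11)
  else
    let ub := pvRangesB.getD lo (0, 0)
    let lower : Int := if lo > 0 then pvUppersB.getD (lo - 1) 0 + 1 else 0
    (lower, ub.1, ub.2)

-- ===== PRECONDITION & SPEC =====
def Spec_get_range_info (diff : Int) (out : Int × Int × Int) : Prop := out = get_range_info_alt diff
instance (diff : Int) (out : Int × Int × Int) : Decidable (Spec_get_range_info diff out) := by unfold Spec_get_range_info; infer_instance

-- ===== CLAIM (what is proved, stated in full; the proofs are below) =====
def Claim_equal_get_range_info : Prop := ∀ (diff : Int), Dom_get_range_info diff → Spec_get_range_info diff (get_range_info diff)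

-- ===== LEMMAS AND PROOFS =====

-- ===== VERDICT (by name: the statement is the Claim_ definition above) =====
theorem get_range_info_spec : Claim_equal_get_range_info := by
  intro diff _
  unfold Spec_get_range_info get_range_info get_range_info_alt
  by_cases h1 : diff ≤ 7
  · simp [pvLoopA, pvBisect, pvRangesA, pvRangesB, pvUppersB, h1,
      show ¬(127 < diff) by omega,
      show ¬(31 < diff) by omega,
      show ¬(15 < diff) by omega,
      show ¬(7 < diff) by omega,
      PySem.List.index?, PySem.List.pyGet?]
    decide
  by_cases h2 : diff ≤ 15
  · simp [pvLoopA, pvBisect, pvRangesA, pvRangesB, pvUppersB, h2,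
      show ¬(diff ≤ 7) by omega,
      show ¬(127 < diff) by omega,
      show ¬(31 < diff) by omega,
      show ¬(15 < diff) by omega,
      show (7 < diff) by omega,
      PySem.List.index?, PySem.List.pyGet?]
    decide
  by_cases h3 : diff ≤ 31
  · simp [pvLoopA, pvBisect, pvRangesA, pvRangesB, pvUppersB, h3,
      show ¬(diff ≤ 7) by omega,
      show ¬(diff ≤ 15) by omega,
      show ¬(127 < diff) by omega,
      show ¬(31 < diff) by omega,
      show (15 < diff) by omega,
      PySem.List.index?, PySem.List.pyGet?]
    decide
  by_cases h4 : diff ≤ 63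
  · simp [pvLoopA, pvBisect, pvRangesA, pvRangesB, pvUppersB, h4,
      show ¬(diff ≤ 7) by omega,
      show ¬(diff ≤ 15) by omega,
      show ¬(diff ≤ 31) by omega,
      show ¬(127 < diff) by omega,
      show (31 < diff) by omega,
      show ¬(63 < diff) by omega,
      PySem.List.index?, PySem.List.pyGet?]
    decide
  by_cases h5 : diff ≤ 127
  · simp [pvLoopA, pvBisect, pvRangesA, pvRangesB, pvUppersB, h5,
      show ¬(diff ≤ 7) by omega,
      show ¬(diff ≤ 15) by omega,
      show ¬(diff ≤ 31) by omega,
      show ¬(diff ≤ 63) by omega,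
      show ¬(127 < diff) by omega,
      show (31 < diff) by omega,
      show (63 < diff) by omega,
      PySem.List.index?, PySem.List.pyGet?]
    decide
  by_cases h6 : diff ≤ 255
  · simp [pvLoopA, pvBisect, pvRangesA, pvRangesB, pvUppersB, h6,
      show ¬(diff ≤ 7) by omega,
      show ¬(diff ≤ 15) by omega,
      show ¬(diff ≤ 31) by omega,
      show ¬(diff ≤ 63) by omega,
      show ¬(diff ≤ 127) by omega,
      show (127 < diff) by omega,
      show ¬(511 < diff) by omega,
      show ¬(255 < diff) by omega,
      PySem.List.index?, PySem.List.pyGet?]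
    decide
  by_cases h7 : diff ≤ 511
  · simp [pvLoopA, pvBisect, pvRangesA, pvRangesB, pvUppersB, h7,
      show ¬(diff ≤ 7) by omega,
      show ¬(diff ≤ 15) by omega,
      show ¬(diff ≤ 31) by omega,
      show ¬(diff ≤ 63) by omega,
      show ¬(diff ≤ 127) by omega,
      show ¬(diff ≤ 255) by omega,
      show (127 < diff) by omega,
      show ¬(511 < diff) by omega,
      show (255 < diff) by omega,
      PySem.List.index?, PySem.List.pyGet?]
    decide
  by_cases h8 : diff ≤ 1023
  · simp [pvLoopA, pvBisect, pvRangesA, pvRangesB, pvUppersB, h8,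
      show ¬(diff ≤ 7) by omega,
      show ¬(diff ≤ 15) by omega,
      show ¬(diff ≤ 31) by omega,
      show ¬(diff ≤ 63) by omega,
      show ¬(diff ≤ 127) by omega,
      show ¬(diff ≤ 255) by omega,
      show ¬(diff ≤ 511) by omega,
      show (127 < diff) by omega,
      show (511 < diff) by omega,
      show ¬(1023 < diff) by omega,
      PySem.List.index?, PySem.List.pyGet?]
    decide
  · simp [pvLoopA, pvBisect, pvRangesA, pvUppersB, h8,
      show ¬(diff ≤ 7) by omega,
      show ¬(diff ≤ 15) by omega,
      show ¬(diff ≤ 31) by omega,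
      show ¬(diff ≤ 63) by omega,
      show ¬(diff ≤ 127) by omega,
      show ¬(diff ≤ 255) by omega,
      show ¬(diff ≤ 511) by omega,
      show (127 < diff) by omega,
      show (511 < diff) by omega,
      show (1023 < diff) by omega]
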